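-- pv_equiv track=rewrite | github.com/koonerts/algo | ace-tpi/hash-tables.py | find_symmetric
-- ===== SOURCE A (Python) =====
-- def find_symmetric(my_list):
--     map_ = {}
--     for pair in my_list:
--         if pair[0] not in map_:
--             map_[pair[0]] = [pair]
--         else:
--             map_[pair[0]].append(pair)
--
--     result = []
--     for pair in my_list:
--         if pair[1] in map_:
--             if [pair[1], pair[0]] in map_[pair[1]]:
--                 result.append(pair)
--     return result
-- ===== SOURCE B (Python) =====
-- def find_symmetric(my_list):
--     result = []
--     for pair in my_list:
--         rev = [pair[1], pair[0]]
--         for other in my_list: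
--             if other == rev:
--                 result.append(pair)
--                 break
--     return result
-- ===== Notes on version B (the rewrite author's own statement) =====
-- stated objective: simpler
-- what changed: Dropped the grouping dict entirely: B scans the list directly for the reversed 2-element pair, appending on the first match.
import Mathlib
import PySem

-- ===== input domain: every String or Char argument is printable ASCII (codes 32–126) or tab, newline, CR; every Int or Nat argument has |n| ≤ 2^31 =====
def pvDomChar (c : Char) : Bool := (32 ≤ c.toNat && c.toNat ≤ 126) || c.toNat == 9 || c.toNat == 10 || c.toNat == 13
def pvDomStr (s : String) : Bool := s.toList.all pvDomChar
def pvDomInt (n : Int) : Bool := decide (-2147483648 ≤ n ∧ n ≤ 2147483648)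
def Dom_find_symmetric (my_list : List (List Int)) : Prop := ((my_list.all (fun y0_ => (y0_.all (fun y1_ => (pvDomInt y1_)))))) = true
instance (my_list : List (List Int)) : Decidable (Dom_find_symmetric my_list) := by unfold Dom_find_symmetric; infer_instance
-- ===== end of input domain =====

-- B replaces A's grouping dict with a direct scan of the list for the reversed pair (simpler, no index structure; same return value).

-- ===== PORT A =====
-- literal port of A's first loop: dict from first element to the list of pairs starting with it
def fsBuild (my_list : List (List Int)) : PySem.Dict Int (List (List Int)) :=
  my_list.foldl (fun d pair =>
    if !(d.contains (PySem.List.pyGetD pair 0 0)) then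
      d.insert (PySem.List.pyGetD pair 0 0) [pair]
    else
      d.modify (PySem.List.pyGetD pair 0 0) [] (fun l => l ++ [pair])) PySem.Dict.empty

-- literal port of A: build the dict, then the filtering loop
def find_symmetric (my_list : List (List Int)) : List (List Int) :=
  let map_ := fsBuild my_list
  my_list.foldl (fun result pair =>
    if map_.contains (PySem.List.pyGetD pair 1 0) then
      if [PySem.List.pyGetD pair 1 0, PySem.List.pyGetD pair 0 0] ∈ map_.getD (PySem.List.pyGetD pair 1 0) [] then
        result ++ [pair]
      else result
    else result) []

-- ===== PORT B =====
-- inner scan of Source B: 'for other in my_list: if other == rev: …append…; break'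
def fsScan : List (List Int) → List Int → Bool
  | [], _ => false
  | o :: rest, rev => if o = rev then true else fsScan rest rev

def find_symmetric_alt (my_list : List (List Int)) : List (List Int) :=
  my_list.foldl (fun result pair =>
    if fsScan my_list [PySem.List.pyGetD pair 1 0, PySem.List.pyGetD pair 0 0] then
      result ++ [pair]
    else result) []

-- ===== PRECONDITION & SPEC =====
-- Pre_ excludes exactly the inputs where Python raises: a pair shorter than 2 makes pair[0]/pair[1] an IndexError in both A and B.
def Pre_find_symmetric (my_list : List (List Int)) : Prop := ∀ p ∈ my_list, 2 ≤ p.length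
instance (my_list : List (List Int)) : Decidable (Pre_find_symmetric my_list) := by unfold Pre_find_symmetric; infer_instance

def pvWitness_find_symmetric : List (List Int) := [[1, 2], [2, 1], [3, 4]]

def Spec_find_symmetric (my_list : List (List Int)) (out : List (List Int)) : Prop := out = find_symmetric_alt my_list
instance (my_list : List (List Int)) (out : List (List Int)) : Decidable (Spec_find_symmetric my_list out) := by unfold Spec_find_symmetric; infer_instance

-- ===== CLAIM (what is proved, stated in full; the proofs are below) =====
def Claim_equal_find_symmetric : Prop := ∀ (my_list : List (List Int)), Dom_find_symmetric my_list → Pre_find_symmetric my_list → Spec_find_symmetric my_list (find_symmetric my_list)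

-- ===== LEMMAS AND PROOFS =====

-- A's branchy dict update is exactly 'modify with default []' in both branches
lemma fs_build_step_eq (d : PySem.Dict Int (List (List Int))) (pair : List Int) :
    (if !(d.contains (PySem.List.pyGetD pair 0 0)) then
      d.insert (PySem.List.pyGetD pair 0 0) [pair]
    else
      d.modify (PySem.List.pyGetD pair 0 0) [] (fun l => l ++ [pair]))
    = d.modify (PySem.List.pyGetD pair 0 0) [] (fun l => l ++ [pair]) := by
  by_cases h : d.contains (PySem.List.pyGetD pair 0 0) = true
  · simp [h]
  · simp only [Bool.not_eq_true] at h
    simp [h, PySem.Dict.modify, PySem.Dict.insert,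
      PySem.Dict.getD_of_not_contains _ _ h]

-- the bucket of key c holds exactly the pairs of l whose first element is c, in order
lemma fs_build_getD (l : List (List Int)) (c : Int) :
    (fsBuild l).getD c [] = l.filter (fun q => PySem.List.pyGetD q 0 0 == c) := by
  unfold fsBuild
  rw [PySem.List.foldl_congr_mem l _
      (fun d pair => d.modify (PySem.List.pyGetD pair 0 0) [] (fun l => l ++ [pair])) _
      (fun acc x _ => fs_build_step_eq acc x)]
  have hmap : l.foldl
      (fun d pair => d.modify (PySem.List.pyGetD pair 0 0) [] (fun l => l ++ [pair]))
      PySem.Dict.empty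
      = ((l.map (fun p : List Int => (PySem.List.pyGetD p 0 0, p))).foldl
          (fun d q => d.modify q.1 [] (fun l => l ++ [q.2])) PySem.Dict.empty) := by
    rw [List.foldl_map]
  rw [hmap, PySem.Dict.getD_foldl_modify_append]
  simp [List.filter_map, List.map_map, Function.comp_def]

-- A's two-level condition is plain membership of the reversed pair in the input list
lemma fs_condA_iff (l : List (List Int)) (pair : List Int) :
    ((fsBuild l).contains (PySem.List.pyGetD pair 1 0) = true ∧
      [PySem.List.pyGetD pair 1 0, PySem.List.pyGetD pair 0 0] ∈
        (fsBuild l).getD (PySem.List.pyGetD pair 1 0) [])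
    ↔ [PySem.List.pyGetD pair 1 0, PySem.List.pyGetD pair 0 0] ∈ l := by
  constructor
  · rintro ⟨-, hmem⟩
    rw [fs_build_getD] at hmem
    exact (List.mem_filter.mp hmem).1
  · intro hmem
    have hfil : [PySem.List.pyGetD pair 1 0, PySem.List.pyGetD pair 0 0] ∈
        l.filter (fun q => PySem.List.pyGetD q 0 0 == PySem.List.pyGetD pair 1 0) := by
      refine List.mem_filter.mpr ⟨hmem, ?_⟩
      simp [PySem.List.pyGetD]
    refine ⟨?_, by rw [fs_build_getD]; exact hfil⟩
    by_contra hc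
    simp only [Bool.not_eq_true] at hc
    have hbkt := PySem.Dict.getD_of_not_contains _ ([] : List (List Int)) hc
    rw [fs_build_getD] at hbkt
    rw [hbkt] at hfil
    simp at hfil

-- Source B's inner scan finds exactly the members of the list
lemma fsScan_iff (l : List (List Int)) (rev : List Int) : fsScan l rev = true ↔ rev ∈ l := by
  induction l with
  | nil => simp [fsScan]
  | cons o rest ih =>
    by_cases h : o = rev
    · simp [fsScan, h]
    · simp only [fsScan, if_neg h, ih, List.mem_cons]
      constructor
      · exact Or.inr
      · rintro (rfl | hm)
        · exact absurd rfl h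
        · exact hm

-- ===== VERDICT (by name: the statement is the Claim_ definition above) =====
theorem find_symmetric_spec : Claim_equal_find_symmetric := by
  intro my_list _hdom _hpre
  unfold Spec_find_symmetric find_symmetric find_symmetric_alt
  apply PySem.List.foldl_congr_mem
  intro acc pair _hmem
  by_cases h : [PySem.List.pyGetD pair 1 0, PySem.List.pyGetD pair 0 0] ∈ my_list
  · have hA := (fs_condA_iff my_list pair).mpr h
    simp [hA.1, hA.2, (fsScan_iff my_list _).mpr h]
  · have hB : fsScan my_list [PySem.List.pyGetD pair 1 0, PySem.List.pyGetD pair 0 0] = false := by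
      rw [← Bool.not_eq_true, fsScan_iff]; exact h
    by_cases hc : (fsBuild my_list).contains (PySem.List.pyGetD pair 1 0) = true
    · have hnot : [PySem.List.pyGetD pair 1 0, PySem.List.pyGetD pair 0 0] ∉
          (fsBuild my_list).getD (PySem.List.pyGetD pair 1 0) [] := by
        intro hm
        exact h ((fs_condA_iff my_list pair).mp ⟨hc, hm⟩)
      simp [hc, hnot, hB]
    · simp [hc, hB]
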